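-- pv_equiv track=rewrite | github.com/nehajalan13/GeeksForGeeks | Replace_all_0's_with_5.py | convertFive
-- ===== SOURCE A (Python) =====
-- def convertFive(n):
--     # Code here
--     if n == 0:
--         return 5
--     else:
--         temp =0
--         while (n>0):
--             d = n % 10
--             if (d == 0):
--                 d = 5
--             temp = (temp*10) + d
--             n = n//10
--     while (temp>0):
--         d = temp % 10
--         n = (n*10) + d
--         temp = temp//10
--     return n
-- ===== SOURCE B (Python) =====
-- def convertFive(n):
--     if n < 10:
--         return 5 if n == 0 else n
--     d = n % 10
--     return convertFive(n // 10) * 10 + (5 if d == 0 else d)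
-- ===== Notes on version B (the rewrite author's own statement) =====
-- stated objective: simpler
-- what changed: Replaces A's two while-loops (build a reversed digit-mapped number, then reverse it back) with one direct recursion over the digits that builds the result most-significant-first, so no reversal pass or temp accumulator is needed.
import Mathlib
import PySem

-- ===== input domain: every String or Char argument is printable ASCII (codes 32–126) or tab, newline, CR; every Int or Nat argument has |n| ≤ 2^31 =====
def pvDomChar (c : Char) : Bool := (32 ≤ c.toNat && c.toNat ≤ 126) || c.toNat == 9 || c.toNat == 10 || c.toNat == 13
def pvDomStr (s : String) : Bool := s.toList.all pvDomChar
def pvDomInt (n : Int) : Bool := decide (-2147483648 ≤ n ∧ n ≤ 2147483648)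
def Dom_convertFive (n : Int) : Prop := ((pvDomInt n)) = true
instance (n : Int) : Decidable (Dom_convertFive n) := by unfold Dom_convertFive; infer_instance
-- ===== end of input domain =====

-- B replaces A's two while-loops (reverse-with-mapping then reverse-back) with a single
-- direct recursion over the digits; objective: simpler, same O(d) cost.


-- ===== PORT A =====
-- first while-loop of A: consumes n into temp (digit 0 mapped to 5); returns (final n, temp)
def convertFiveLoop1 (n temp : Int) : Int × Int :=
  if 0 < n then
    let d := PySem.Int.mod n 10
    let d := if d = 0 then 5 else d
    convertFiveLoop1 (PySem.Int.floordiv n 10) (temp * 10 + d)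
  else (n, temp)
termination_by n.toNat
decreasing_by
  rename_i _h
  rw [PySem.Int.floordiv_eq_ediv_of_pos (by omega : (0:Int) < 10)]
  omega

-- second while-loop of A: pops digits of temp onto n
def convertFiveLoop2 (temp n : Int) : Int :=
  if 0 < temp then
    let d := PySem.Int.mod temp 10
    convertFiveLoop2 (PySem.Int.floordiv temp 10) (n * 10 + d)
  else n
termination_by temp.toNat
decreasing_by
  rename_i _h
  rw [PySem.Int.floordiv_eq_ediv_of_pos (by omega : (0:Int) < 10)]
  omega

def convertFive (n : Int) : Int :=
  if n = 0 then 5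
  else
    let p := convertFiveLoop1 n 0
    convertFiveLoop2 p.2 p.1

-- ===== PORT B =====
def convertFive_alt (n : Int) : Int :=
  if n < 10 then (if n = 0 then 5 else n)
  else
    let d := PySem.Int.mod n 10
    convertFive_alt (PySem.Int.floordiv n 10) * 10 + (if d = 0 then 5 else d)
termination_by n.toNat
decreasing_by
  rename_i _h
  rw [PySem.Int.floordiv_eq_ediv_of_pos (by omega : (0:Int) < 10)]
  omega

-- ===== PRECONDITION & SPEC =====
def Spec_convertFive (n : Int) (out : Int) : Prop := out = convertFive_alt n
instance (n : Int) (out : Int) : Decidable (Spec_convertFive n out) := by unfold Spec_convertFive; infer_instance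

-- ===== CLAIM (what is proved, stated in full; the proofs are below) =====
def Claim_equal_convertFive : Prop := ∀ (n : Int), Dom_convertFive n → Spec_convertFive n (convertFive n)

-- ===== LEMMAS AND PROOFS =====

-- proof-side helper: digit-mapped value of n, appended after acc (most-significant-first)
def cfShift (acc n : Int) : Int :=
  if 0 < n then
    cfShift acc (n / 10) * 10 + (if n % 10 = 0 then 5 else n % 10)
  else acc
termination_by n.toNat
decreasing_by rename_i h; omega

theorem cfShift_nonpos {acc n : Int} (h : ¬ 0 < n) : cfShift acc n = acc := by
  rw [cfShift]; simp [h]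

theorem cfShift_pos {acc n : Int} (h : 0 < n) :
    cfShift acc n = cfShift acc (n / 10) * 10 + (if n % 10 = 0 then 5 else n % 10) := by
  rw [cfShift]; simp [h]

-- one step of convertFiveLoop2 on temp*10 + d, a single digit 1..9 appended
theorem loop2_step (temp d acc : Int) (htemp : 0 ≤ temp) (hd1 : 1 ≤ d) (hd9 : d ≤ 9) :
    convertFiveLoop2 (temp * 10 + d) acc = convertFiveLoop2 temp (acc * 10 + d) := by
  rw [convertFiveLoop2]
  have hpos : 0 < temp * 10 + d := by omega
  have h10 : (0:Int) < 10 := by omega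
  rw [if_pos hpos]
  have hmod : PySem.Int.mod (temp * 10 + d) 10 = d := by
    rw [PySem.Int.mod_eq_emod_of_pos h10]; omega
  have hdiv : PySem.Int.floordiv (temp * 10 + d) 10 = temp := by
    rw [PySem.Int.floordiv_eq_ediv_of_pos h10]; omega
  rw [hmod, hdiv]

-- main invariant: running loop2 on loop1's temp equals appending the mapped digits of n
theorem loop_main : ∀ (k : Nat) (n temp acc : Int), n.toNat ≤ k → 0 ≤ n → 0 ≤ temp →
    convertFiveLoop2 (convertFiveLoop1 n temp).2 acc = convertFiveLoop2 temp (cfShift acc n) := by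
  intro k
  induction k with
  | zero =>
    intro n temp acc hk hn _
    have hn0 : n = 0 := by omega
    subst hn0
    rw [convertFiveLoop1, cfShift_nonpos (by omega)]
    simp
  | succ k ih =>
    intro n temp acc hk hn htemp
    by_cases hpos : 0 < n
    · have h10 : (0:Int) < 10 := by omega
      rw [convertFiveLoop1, if_pos hpos]
      simp only
      set d0 := PySem.Int.mod n 10 with hd0
      have hd0b : 0 ≤ d0 ∧ d0 < 10 := by
        rw [hd0, PySem.Int.mod_eq_emod_of_pos h10]; omega
      set d := if d0 = 0 then 5 else d0 with hd
      have hdb : 1 ≤ d ∧ d ≤ 9 := by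
        rw [hd]; split_ifs with h0
        · omega
        · omega
      have hdivpos : PySem.Int.floordiv n 10 = n / 10 := PySem.Int.floordiv_eq_ediv_of_pos h10
      have hrec : (n / 10).toNat ≤ k := by omega
      rw [hdivpos]
      rw [ih (n / 10) (temp * 10 + d) acc hrec (by omega) (by omega)]
      rw [loop2_step temp d (cfShift acc (n / 10)) htemp hdb.1 hdb.2]
      rw [cfShift_pos hpos]
      have hmod : d = if n % 10 = 0 then 5 else n % 10 := by
        rw [hd, hd0, PySem.Int.mod_eq_emod_of_pos h10]
      rw [hmod]
    · rw [convertFiveLoop1, if_neg hpos, cfShift_nonpos hpos]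

-- cfShift 0 n is exactly convertFive_alt n for positive n
theorem cfShift_eq_alt : ∀ (k : Nat) (n : Int), n.toNat ≤ k → 0 < n →
    cfShift 0 n = convertFive_alt n := by
  intro k
  induction k with
  | zero => intro n hk hn; omega
  | succ k ih =>
    intro n hk hn
    have h10 : (0:Int) < 10 := by omega
    rw [cfShift_pos hn, convertFive_alt]
    by_cases hsmall : n < 10
    · have hdiv0 : n / 10 = 0 := by omega
      have hmodn : n % 10 = n := by omega
      rw [if_pos hsmall, hdiv0, cfShift_nonpos (by omega), hmodn]
      simp [Int.ne_of_gt hn]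
    · rw [if_neg hsmall]
      simp only
      rw [PySem.Int.floordiv_eq_ediv_of_pos h10, PySem.Int.mod_eq_emod_of_pos h10]
      rw [← ih (n / 10) (by omega) (by omega)]

theorem loop1_fst (n temp : Int) (hn : 0 ≤ n) : (convertFiveLoop1 n temp).1 = 0 := by
  by_cases hpos : 0 < n
  · rw [convertFiveLoop1, if_pos hpos]
    have : (PySem.Int.floordiv n 10).toNat < n.toNat := by
      rw [PySem.Int.floordiv_eq_ediv_of_pos (by omega : (0:Int) < 10)]; omega
    exact loop1_fst _ _ (by rw [PySem.Int.floordiv_eq_ediv_of_pos (by omega : (0:Int) < 10)]; omega)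
  · rw [convertFiveLoop1, if_neg hpos]; omega
termination_by n.toNat
decreasing_by
  rename_i h _
  rw [PySem.Int.floordiv_eq_ediv_of_pos (by omega : (0:Int) < 10)]
  omega

-- ===== VERDICT (by name: the statement is the Claim_ definition above) =====
theorem convertFive_spec : Claim_equal_convertFive := by
  unfold Claim_equal_convertFive Spec_convertFive
  intro n _
  unfold convertFive
  by_cases h0 : n = 0
  · subst h0
    rw [if_pos rfl, convertFive_alt]
    norm_num
  · rw [if_neg h0]
    by_cases hpos : 0 < n
    · simp only
      rw [loop1_fst n 0 (by omega)]
      rw [loop_main n.toNat n 0 0 (le_refl _) (by omega) (by omega)]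
      rw [convertFiveLoop2, if_neg (by omega : ¬ (0:Int) < 0)]
      exact cfShift_eq_alt n.toNat n (le_refl _) hpos
    · -- negative n: A's loops are no-ops and it returns n; B's base case returns n
      have hneg : n < 0 := by omega
      rw [convertFiveLoop1, if_neg hpos]
      simp only
      rw [convertFiveLoop2, if_neg (by omega : ¬ (0:Int) < 0)]
      rw [convertFive_alt, if_pos (by omega : n < 10), if_neg h0]
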